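-- pv_equiv track=rewrite | github.com/ltdong1024/algorithms | python/codewars/base64.py | to_base_64
-- ===== SOURCE A (Python) =====
-- import math
--
-- def int_to_bin(n, min_length=8):
--     if n == 0:
--         return "0"*min_length
--
--     max_power = int(math.log(n,2) + 1)
--     powers = [pow(2,i) for i in range(max_power)][::-1]
--
--     binary = ""
--     for i in powers:
--         w = math.floor(n//i)
--         n = n%i
--         binary += str(int(w))
--
--     binary = "0"*(min_length-len(binary)) + binary
--
--     return binary
--
-- def bin_to_int(b):
--     return sum([int(b[::-1][i]) * pow(2,i) for i in range(len(b))])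
--
-- def int_to_base64(int):
--     # from 0 to 25 is A to Z
--     if int in range(26):
--         return chr(int + 65)
--     # from 26 to 51 is a to z
--     if int in range(26, 52):
--         return chr(int + 71)
--     # from 52 to 61 is 0 to 9
--     if int in range(52, 62):
--         return chr(int - 4)
--
--     # other cases
--     if int == 62:
--         return "+"
--     if int == 63:
--         return "/"
--
-- def to_base_64(str):
--     # turn every letter in the string into a binary and add them together
--     binaries = "".join([int_to_bin(ord(char)) for char in str])
--
--     # add zeroes until reaching 24 characters
--     binaries += "0"*(24 - len(binaries)%24)
--
--     # split every 6 characters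
--     binaries = [binaries[i:i+6] for i in range(0,len(binaries),6)]
--
--     # turn every binary into a number
--     base64 = "".join([int_to_base64(bin_to_int(binary)) for binary in binaries])
--
--     # trim tailing "A"
--     while base64[-1] == "A":
--         base64 = base64[:-1]
--
--     return base64
-- ===== SOURCE B (Python) =====
-- # Streaming bit-buffer base64 encoder (exact on printable-ASCII/tab/newline/CR input).
-- _B64 = "ABCDEFGHIJKLMNOPQRSTUVWXYZabcdefghijklmnopqrstuvwxyz0123456789+/"
--
-- def to_base_64(str):
--     buf = 0
--     nbits = 0
--     out = ""
--     for c in str: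
--         buf = (buf << 8) | ord(c)
--         nbits += 8
--         while nbits >= 6:
--             nbits -= 6
--             out += _B64[(buf >> nbits) & 63]
--             buf &= (1 << nbits) - 1
--     if nbits > 0:
--         out += _B64[(buf << (6 - nbits)) & 63]
--     while out[-1] == "A":
--         out = out[:-1]
--     return out
-- ===== Notes on version B (the rewrite author's own statement) =====
-- stated objective: faster
-- what changed: B replaces A's pipeline (per-char binary strings via a log/powers division loop, join, zero-pad to 24 bits, slice into 6-char substrings, re-parse each back to an int) with a single-pass streaming bit-buffer: an integer accumulator and bit counter emit a base64 character whenever 6 bits are available, plus one flush at the end, followed by the same trailing-'A' trim.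
import Mathlib
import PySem

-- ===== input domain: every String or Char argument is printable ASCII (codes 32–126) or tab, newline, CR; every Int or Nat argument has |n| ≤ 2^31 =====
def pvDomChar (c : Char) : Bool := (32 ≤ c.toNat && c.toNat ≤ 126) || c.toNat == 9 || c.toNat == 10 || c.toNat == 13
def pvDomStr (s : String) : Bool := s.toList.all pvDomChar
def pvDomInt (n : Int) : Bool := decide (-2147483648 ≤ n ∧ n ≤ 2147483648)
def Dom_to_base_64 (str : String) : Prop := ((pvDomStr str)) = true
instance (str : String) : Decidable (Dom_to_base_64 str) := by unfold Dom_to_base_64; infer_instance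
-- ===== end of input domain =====

-- B replaces A's build-a-giant-bit-string-then-slice pipeline by a one-pass streaming
-- bit-buffer encoder; same trailing-'A' trim, so both raise on the empty string (excluded by Pre_).

-- ===== PORT A =====

-- shared by both ports: Python's  while out[-1] == 'A': out = out[:-1]
-- (out[-1] on the empty list raises IndexError in Python; those inputs are outside Pre_)
def trimTrailingA (l : List Char) : List Char :=
  if h : l.getLast? = some 'A' then trimTrailingA l.dropLast else l
termination_by l.length
decreasing_by
  have hne : l ≠ [] := by intro h'; subst h'; simp at h
  have : 0 < l.length := List.length_pos_iff.mpr hne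
  simp [List.length_dropLast]; omega

def intToBin (n : Nat) (minLength : Nat) : List Char :=
  if n = 0 then List.replicate minLength '0'
  else
    -- int(math.log(n, 2) + 1): equals the bit length for every n this file admits
    -- (1 ≤ n ≤ 126; checked against CPython's float log on that range)
    let maxPower := Nat.log2 n + 1
    let powers := ((List.range maxPower).map (fun i => 2 ^ i)).reverse
    let st := powers.foldl (fun (st : Nat × List Char) i =>
      (st.1 % i, st.2 ++ PySem.Int.toChars ((st.1 / i : Nat) : Int))) (n, [])
    List.replicate (minLength - st.2.length) '0' ++ st.2

def binToInt (b : List Char) : Int :=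
  -- b[::-1][i] is an in-range index (i < len b); int(c) succeeds since the callers
  -- pass strings of '0'/'1' digits, so both getD defaults are unreachable
  (((List.range b.length).map (fun i =>
    (PySem.Int.ofChars? [b.reverse.getD i ' ']).getD 0 * 2 ^ i)).sum)

def intToBase64 (n : Int) : List Char :=
  if 0 ≤ n ∧ n < 26 then [Char.ofNat (n + 65).toNat]
  else if 26 ≤ n ∧ n < 52 then [Char.ofNat (n + 71).toNat]
  else if 52 ≤ n ∧ n < 62 then [Char.ofNat (n - 4).toNat]
  else if n = 62 then ['+']
  else if n = 63 then ['/']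
  else []  -- Python returns None here; unreachable for the 6-bit values this is called with

def to_base_64 (str : String) : String :=
  let binaries := (str.toList.map (fun c => intToBin c.toNat 8)).flatten
  let binaries := binaries ++ List.replicate (24 - binaries.length % 24) '0'
  let chunks := (PySem.List.pyRange 0 (binaries.length : Int) 6).map
      (fun i => PySem.List.slice binaries (some i) (some (i + 6)))
  let base64 := (chunks.map (fun chunk => intToBase64 (binToInt chunk))).flatten
  String.ofList (trimTrailingA base64)

-- ===== PORT B =====

def pyB64Table : List Char :=
  "ABCDEFGHIJKLMNOPQRSTUVWXYZabcdefghijklmnopqrstuvwxyz0123456789+/".toList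

-- the  while nbits >= 6:  drain loop of Source B (table index is always in range; getD default unreachable)
def pyB64Emit (buf nbits : Nat) (out : List Char) : Nat × Nat × List Char :=
  if 6 ≤ nbits then
    pyB64Emit (buf &&& ((1 <<< (nbits - 6)) - 1)) (nbits - 6)
      (out ++ [pyB64Table.getD ((buf >>> (nbits - 6)) &&& 63) ' '])
  else (buf, nbits, out)
termination_by nbits
decreasing_by omega

def to_base_64_alt (str : String) : String :=
  let st := str.toList.foldl
    (fun (st : Nat × Nat × List Char) c =>
      pyB64Emit ((st.1 <<< 8) ||| c.toNat) (st.2.1 + 8) st.2.2)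
    (0, 0, [])
  let out := if 0 < st.2.1 then
      st.2.2 ++ [pyB64Table.getD ((st.1 <<< (6 - st.2.1)) &&& 63) ' ']
    else st.2.2
  String.ofList (trimTrailingA out)

-- ===== PRECONDITION & SPEC =====

-- Pre_ excludes only the empty string, on which Python A raises IndexError
-- (the final trim loop empties the all-'A' output and then evaluates base64[-1]).
def Pre_to_base_64 (str : String) : Prop := str ≠ ""
instance (str : String) : Decidable (Pre_to_base_64 str) := by unfold Pre_to_base_64; infer_instance

def pvWitness_to_base_64 : String := "Hi"

def Spec_to_base_64 (str : String) (out : String) : Prop := out = to_base_64_alt str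
instance (str : String) (out : String) : Decidable (Spec_to_base_64 str out) := by
  unfold Spec_to_base_64; infer_instance

-- ===== CLAIM (what is proved, stated in full; the proofs are below) =====
def Claim_equal_to_base_64 : Prop :=
  ∀ (str : String), Dom_to_base_64 str → Pre_to_base_64 str → Spec_to_base_64 str (to_base_64 str)

-- ===== LEMMAS AND PROOFS =====

-- the value of a big-endian bit string
def bitChar (c : Char) : Nat := if c = '1' then 1 else 0
def bval (l : List Char) : Nat := l.foldl (fun a c => 2 * a + bitChar c) 0
-- the 8-bit binary string of n
def bitsStr (n : Nat) : List Char :=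
  (List.range 8).map (fun i => if (n >>> (7 - i)) % 2 = 1 then '1' else '0')
def bitsOf (cs : List Char) : List Char := cs.flatMap (fun c => bitsStr c.toNat)
def encC (chunk : List Char) : Char := pyB64Table.getD (bval chunk) ' '

def fullChunks (l : List Char) : List (List Char) :=
  if 6 ≤ l.length then l.take 6 :: fullChunks (l.drop 6) else []
termination_by l.length
decreasing_by simp [List.length_drop]; omega

def remBits (l : List Char) : List Char :=
  if 6 ≤ l.length then remBits (l.drop 6) else l
termination_by l.length
decreasing_by simp [List.length_drop]; omega

lemma fullChunks_pos {l : List Char} (h : 6 ≤ l.length) :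
    fullChunks l = l.take 6 :: fullChunks (l.drop 6) := by rw [fullChunks, if_pos h]

lemma fullChunks_neg {l : List Char} (h : ¬ 6 ≤ l.length) : fullChunks l = [] := by
  rw [fullChunks, if_neg h]

lemma remBits_pos {l : List Char} (h : 6 ≤ l.length) : remBits l = remBits (l.drop 6) := by
  rw [remBits, if_pos h]

lemma remBits_neg {l : List Char} (h : ¬ 6 ≤ l.length) : remBits l = l := by
  rw [remBits, if_neg h]

def chunksPad (l : List Char) : List (List Char) :=
  fullChunks l ++
    (if remBits l = [] then []
     else [remBits l ++ List.replicate (6 - (remBits l).length) '0'])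

def isBin (l : List Char) : Prop := ∀ c ∈ l, c = '0' ∨ c = '1'

lemma bval_foldl (a : Nat) (l : List Char) :
    l.foldl (fun a c => 2 * a + bitChar c) a = a * 2 ^ l.length + bval l := by
  induction l generalizing a with
  | nil => simp [bval]
  | cons c l ih =>
    have hb : bval (c :: l) = bitChar c * 2 ^ l.length + bval l := by
      show List.foldl _ (2 * 0 + bitChar c) l = _
      rw [ih]; ring_nf
    show List.foldl _ (2 * a + bitChar c) l = _
    rw [ih, hb, List.length_cons, pow_succ]; ring

lemma bval_append (x y : List Char) :
    bval (x ++ y) = bval x * 2 ^ y.length + bval y := by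
  have := bval_foldl (bval x) y
  simp only [bval, List.foldl_append] at *
  exact this

lemma bval_lt (l : List Char) : bval l < 2 ^ l.length := by
  induction l with
  | nil => simp [bval]
  | cons c l ih =>
    have hb : bval (c :: l) = bitChar c * 2 ^ l.length + bval l := by
      show List.foldl _ (2 * 0 + bitChar c) l = _
      rw [bval_foldl]; ring_nf
    have hc : bitChar c ≤ 1 := by unfold bitChar; split <;> simp
    have h1 : bitChar c * 2 ^ l.length ≤ 2 ^ l.length := by
      calc bitChar c * 2 ^ l.length ≤ 1 * 2 ^ l.length := by
            exact Nat.mul_le_mul_right _ hc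
        _ = 2 ^ l.length := by ring
    rw [hb, List.length_cons, pow_succ]
    omega

lemma bval_replicate_zero (k : Nat) : bval (List.replicate k '0') = 0 := by
  induction k with
  | zero => simp [bval]
  | succ k ih =>
    have : (List.replicate (k + 1) '0') = '0' :: List.replicate k '0' := by
      simp [List.replicate_succ]
    rw [this]
    show List.foldl _ (2 * 0 + bitChar '0') _ = _
    rw [bval_foldl]
    simpa [bitChar] using ih

lemma bval_bitsStr : ∀ n : Nat, n < 127 → bval (bitsStr n) = n := by decide

lemma length_bitsStr (n : Nat) : (bitsStr n).length = 8 := by simp [bitsStr]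

lemma isBin_bitsStr (n : Nat) : isBin (bitsStr n) := by
  intro c hc
  simp [bitsStr] at hc
  obtain ⟨i, -, hi⟩ := hc
  split at hi <;> simp [← hi]

lemma intToBin_eq : ∀ n : Nat, n < 127 → intToBin n 8 = bitsStr n := by decide

lemma encA_eq (chunk : List Char) (hl : chunk.length = 6) (hb : isBin chunk) :
    intToBase64 (binToInt chunk) = [encC chunk] := by
  rcases chunk with _ | ⟨a, chunk⟩; · simp at hl
  rcases chunk with _ | ⟨b, chunk⟩; · simp at hl
  rcases chunk with _ | ⟨c, chunk⟩; · simp at hl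
  rcases chunk with _ | ⟨d, chunk⟩; · simp at hl
  rcases chunk with _ | ⟨e, chunk⟩; · simp at hl
  rcases chunk with _ | ⟨f, chunk⟩; · simp at hl
  rcases chunk with _ | ⟨g, chunk⟩; swap; · simp at hl
  simp only [isBin, List.mem_cons, List.not_mem_nil, or_false, forall_eq_or_imp,
    forall_eq] at hb
  obtain ⟨h1, h2, h3, h4, h5, h6⟩ := hb
  rcases h1 with rfl | rfl <;> rcases h2 with rfl | rfl <;> rcases h3 with rfl | rfl <;>
    rcases h4 with rfl | rfl <;> rcases h5 with rfl | rfl <;> rcases h6 with rfl | rfl <;>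
    decide

lemma FR_append : ∀ (n : Nat) (x y : List Char), x.length = n →
    fullChunks (x ++ y) = fullChunks x ++ fullChunks (remBits x ++ y) ∧
    remBits (x ++ y) = remBits (remBits x ++ y) := by
  intro n
  induction n using Nat.strong_induction_on with
  | _ n ih =>
    intro x y hl
    by_cases h6 : 6 ≤ x.length
    · have hxy : 6 ≤ (x ++ y).length := by simp [List.length_append]; omega
      have htake : (x ++ y).take 6 = x.take 6 := by
        rw [List.take_append]
        have : 6 - x.length = 0 := by omega
        simp [this]
      have hdrop : (x ++ y).drop 6 = x.drop 6 ++ y := by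
        rw [List.drop_append]
        have : 6 - x.length = 0 := by omega
        simp [this]
      have hih := ih (x.length - 6) (by omega) (x.drop 6) y (by simp [List.length_drop])
      constructor
      · rw [fullChunks_pos hxy, htake, hdrop, hih.1,
          fullChunks_pos h6, remBits_pos h6]
        simp
      · rw [remBits_pos hxy, hdrop, hih.2, remBits_pos h6]
    · rw [fullChunks_neg h6, remBits_neg h6]
      simp

lemma remBits_length_lt (l : List Char) : (remBits l).length < 6 := by
  have H : ∀ (n : Nat) (l : List Char), l.length = n → (remBits l).length < 6 := by
    intro n
    induction n using Nat.strong_induction_on with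
    | _ n ih =>
      intro l hl
      by_cases h6 : 6 ≤ l.length
      · rw [remBits_pos h6]
        exact ih (l.length - 6) (by omega) _ (by simp [List.length_drop])
      · rw [remBits_neg h6]; omega
  exact H l.length l rfl

lemma fullChunks_replicate_zero (m : Nat) :
    fullChunks (List.replicate (6 * m) '0') = List.replicate m (List.replicate 6 '0') := by
  induction m with
  | zero => exact fullChunks_neg (by simp)
  | succ m ih =>
    have hsplit : List.replicate (6 * (m + 1)) '0'
        = List.replicate 6 '0' ++ List.replicate (6 * m) '0' := by
      rw [← List.replicate_add]; ring_nf
    have hlen : (List.replicate (6 * (m + 1)) '0').length = 6 * (m + 1) := by simp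
    rw [fullChunks_pos (by rw [hlen]; omega), hsplit]
    rw [List.take_append, List.drop_append]
    simp [List.take_replicate, List.drop_replicate, ih, List.replicate_succ]

lemma pad_split : ∀ (n : Nat) (x : List Char) (p : Nat), x.length = n →
    (x.length + p) % 6 = 0 →
    ∃ q, fullChunks (x ++ List.replicate p '0') =
      chunksPad x ++ List.replicate q (List.replicate 6 '0') := by
  intro n
  induction n using Nat.strong_induction_on with
  | _ n ih =>
    intro x p hl hmod
    by_cases h6 : 6 ≤ x.length
    · have hxy : 6 ≤ (x ++ List.replicate p '0').length := by simp; omega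
      have htake : (x ++ List.replicate p '0').take 6 = x.take 6 := by
        rw [List.take_append]
        have : 6 - x.length = 0 := by omega
        simp [this]
      have hdrop : (x ++ List.replicate p '0').drop 6 = x.drop 6 ++ List.replicate p '0' := by
        rw [List.drop_append]
        have : 6 - x.length = 0 := by omega
        simp [this]
      obtain ⟨q, hq⟩ := ih (x.length - 6) (by omega) (x.drop 6) p
        (by simp [List.length_drop]) (by simp [List.length_drop]; omega)
      refine ⟨q, ?_⟩
      rw [fullChunks_pos hxy, htake, hdrop, hq]
      unfold chunksPad
      rw [fullChunks_pos h6, remBits_pos h6]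
      simp
    · rcases eq_or_ne x [] with rfl | hne
      · simp only [List.nil_append, List.length_nil, Nat.zero_add] at hmod ⊢
        obtain ⟨m, rfl⟩ : ∃ m, p = 6 * m := ⟨p / 6, by omega⟩
        refine ⟨m, ?_⟩
        rw [fullChunks_replicate_zero]
        unfold chunksPad
        rw [fullChunks_neg (l := []) (by simp), remBits_neg (l := []) (by simp)]
        simp
      · have hx1 : 1 ≤ x.length := by
          have := List.length_pos_iff.mpr hne; omega
        set t := 6 - x.length with ht
        have hpt : t ≤ p ∧ (p - t) % 6 = 0 := by omega
        obtain ⟨m, hm⟩ : ∃ m, p - t = 6 * m := ⟨(p - t) / 6, by omega⟩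
        have hrep : List.replicate p '0'
            = List.replicate t '0' ++ List.replicate (6 * m) '0' := by
          rw [← List.replicate_add]; congr 1; omega
        have hassoc : x ++ List.replicate p '0'
            = (x ++ List.replicate t '0') ++ List.replicate (6 * m) '0' := by
          rw [hrep, List.append_assoc]
        have hlen6 : (x ++ List.replicate t '0').length = 6 := by simp; omega
        refine ⟨m, ?_⟩
        rw [hassoc, fullChunks_pos (by rw [List.length_append, hlen6]; omega)]
        rw [List.take_append, List.drop_append, hlen6]
        have h0 : (6:Nat) - 6 = 0 := rfl
        rw [List.take_of_length_le (by omega), List.drop_of_length_le (by omega)]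
        simp only [h0, List.take_zero, List.append_nil, List.drop_zero, List.nil_append]
        rw [fullChunks_replicate_zero]
        unfold chunksPad
        rw [fullChunks_neg h6, remBits_neg h6]
        simp [hne, ht]

lemma encC_zero : encC (List.replicate 6 '0') = 'A' := by decide

lemma trim_concat_A (v : List Char) : trimTrailingA (v ++ ['A']) = trimTrailingA v := by
  rw [trimTrailingA]
  rw [dif_pos (show (v ++ ['A']).getLast? = some 'A' from List.getLast?_concat)]
  simp

lemma trim_append_replicate (u : List Char) (q : Nat) :
    trimTrailingA (u ++ List.replicate q 'A') = trimTrailingA u := by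
  induction q with
  | zero => simp
  | succ q ih =>
    rw [List.replicate_succ' (n := q)]
    rw [← List.append_assoc, trim_concat_A, ih]

lemma pyB64Emit_pos {buf nbits : Nat} {out : List Char} (h : 6 ≤ nbits) :
    pyB64Emit buf nbits out =
      pyB64Emit (buf &&& ((1 <<< (nbits - 6)) - 1)) (nbits - 6)
        (out ++ [pyB64Table.getD ((buf >>> (nbits - 6)) &&& 63) ' ']) := by
  rw [pyB64Emit, if_pos h]

lemma pyB64Emit_neg {buf nbits : Nat} {out : List Char} (h : ¬ 6 ≤ nbits) :
    pyB64Emit buf nbits out = (buf, nbits, out) := by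
  rw [pyB64Emit, if_neg h]

lemma and63_eq_mod (x : Nat) : x &&& 63 = x % 64 := by
  have h : (63 : Nat) = 2 ^ 6 - 1 := rfl
  rw [h, Nat.and_two_pow_sub_one_eq_mod]

lemma emit_eq : ∀ (n : Nat) (s out : List Char), s.length = n →
    pyB64Emit (bval s) s.length out =
      (bval (remBits s), (remBits s).length, out ++ (fullChunks s).map encC) := by
  intro n
  induction n using Nat.strong_induction_on with
  | _ n ih =>
    intro s out hl
    by_cases h6 : 6 ≤ s.length
    · have hs : s.take 6 ++ s.drop 6 = s := List.take_append_drop 6 s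
      have hlt : (s.take 6).length = 6 := by simp [List.length_take]; omega
      have hlu : (s.drop 6).length = s.length - 6 := by simp [List.length_drop]
      have hvals : bval s = bval (s.take 6) * 2 ^ (s.drop 6).length + bval (s.drop 6) := by
        conv_lhs => rw [← hs]
        rw [bval_append]
      have hub : bval (s.drop 6) < 2 ^ (s.drop 6).length := bval_lt _
      have htb : bval (s.take 6) < 64 := by
        have := bval_lt (s.take 6); rw [hlt] at this; norm_num at this; exact this
      have hsh : 1 <<< (s.drop 6).length = 2 ^ (s.drop 6).length := by
        rw [Nat.shiftLeft_eq, one_mul]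
      have h1 : (bval s >>> (s.length - 6)) &&& 63 = bval (s.take 6) := by
        rw [← hlu, Nat.shiftRight_eq_div_pow, hvals, and63_eq_mod]
        rw [mul_comm, Nat.mul_add_div (Nat.two_pow_pos _),
          Nat.div_eq_of_lt hub, Nat.add_zero, Nat.mod_eq_of_lt htb]
      have h2 : bval s &&& ((1 <<< (s.length - 6)) - 1) = bval (s.drop 6) := by
        rw [← hlu, hsh, Nat.and_two_pow_sub_one_eq_mod, hvals, Nat.add_comm,
          Nat.add_mul_mod_self_right, Nat.mod_eq_of_lt hub]
      rw [pyB64Emit_pos h6, h1, h2, ← hlu]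
      rw [ih (s.drop 6).length (by omega) (s.drop 6) _ rfl]
      rw [remBits_pos h6, fullChunks_pos h6]
      simp [encC, List.getD]
    · rw [pyB64Emit_neg h6, remBits_neg h6, fullChunks_neg h6]
      simp

lemma fold_eq : ∀ (cs : List Char) (r out : List Char),
    (∀ c ∈ cs, c.toNat < 127) → r.length < 6 →
    cs.foldl (fun (st : Nat × Nat × List Char) c =>
        pyB64Emit ((st.1 <<< 8) ||| c.toNat) (st.2.1 + 8) st.2.2)
      (bval r, r.length, out)
    = (bval (remBits (r ++ bitsOf cs)), (remBits (r ++ bitsOf cs)).length,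
        out ++ (fullChunks (r ++ bitsOf cs)).map encC) := by
  intro cs
  induction cs with
  | nil =>
    intro r out _ hr
    rw [List.foldl_nil]
    have : bitsOf [] = [] := rfl
    rw [this, List.append_nil, remBits_neg (by omega), fullChunks_neg (by omega)]
    simp
  | cons c cs ih =>
    intro r out hcs hr
    have hc : c.toNat < 127 := hcs c (List.mem_cons_self)
    rw [List.foldl_cons]
    have hor : (bval r <<< 8) ||| c.toNat = bval (r ++ bitsStr c.toNat) := by
      rw [bval_append, length_bitsStr, bval_bitsStr c.toNat hc,
        Nat.shiftLeft_eq, Nat.mul_comm]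
      exact (Nat.two_pow_add_eq_or_of_lt (show c.toNat < 2 ^ 8 by omega) _).symm
    have hlen : r.length + 8 = (r ++ bitsStr c.toNat).length := by
      simp [length_bitsStr]
    rw [hor, hlen, emit_eq (r ++ bitsStr c.toNat).length _ _ rfl]
    rw [ih (remBits (r ++ bitsStr c.toNat)) _
      (fun c' h' => hcs c' (List.mem_cons_of_mem _ h')) (remBits_length_lt _)]
    have hglue := FR_append (r ++ bitsStr c.toNat).length (r ++ bitsStr c.toNat) (bitsOf cs) rfl
    have hbits : (r ++ bitsStr c.toNat) ++ bitsOf cs = r ++ bitsOf (c :: cs) := by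
      simp [bitsOf, List.flatMap_cons, List.append_assoc]
    rw [← hbits, hglue.1, hglue.2]
    simp [List.append_assoc]

lemma slices_eq' : ∀ (m : Nat) (l : List Char), l.length = 6 * m →
    (List.range m).map (fun j => (l.drop (6 * j)).take 6) = fullChunks l := by
  intro m
  induction m with
  | zero =>
    intro l hl
    rw [List.range_zero, List.map_nil, fullChunks_neg (by omega)]
  | succ k ihm =>
    intro l hl
    rw [List.range_succ_eq_map, List.map_cons, List.map_map]
    have h0 : (l.drop (6 * 0)).take 6 = l.take 6 := by norm_num
    have hcomp : ((fun j => (l.drop (6 * j)).take 6) ∘ (· + 1))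
        = fun j => ((l.drop 6).drop (6 * j)).take 6 := by
      funext j
      simp only [Function.comp_apply, List.drop_drop]
      congr 2
      omega
    rw [h0, hcomp, ihm (l.drop 6) (by rw [List.length_drop, hl]; omega),
      show fullChunks l = l.take 6 :: fullChunks (l.drop 6) from fullChunks_pos (by omega)]

lemma slices_eq (m : Nat) (l : List Char) (hl : l.length = 6 * m) :
    (PySem.List.pyRange 0 (l.length : Int) 6).map
      (fun i => PySem.List.slice l (some i) (some (i + 6))) = fullChunks l := by
  rw [PySem.List.pyRange_of_pos _ _ (by norm_num : (0:Int) < 6)]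
  have hcount : (if (0:Int) < (l.length : Int)
      then (((l.length : Int) - 0 + 6 - 1) / 6).toNat else 0) = m := by
    rcases Nat.eq_zero_or_pos m with rfl | hm
    · rw [if_neg (by rw [hl]; norm_num)]
    · rw [if_pos (by rw [hl]; push_cast; positivity)]
      rw [hl]
      have : ((6 * m : Nat) : Int) - 0 + 6 - 1 = 5 + (m : Int) * 6 := by push_cast; ring
      rw [this, Int.add_mul_ediv_right _ _ (by norm_num : (6:Int) ≠ 0)]
      norm_num
  rw [hcount, List.map_map]
  rw [← slices_eq' m l hl]
  apply List.map_congr_left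
  intro j hj
  simp only [Function.comp_apply]
  have h1 : (0 : Int) + 6 * (j : Int) = ((6 * j : Nat) : Int) := by push_cast; ring
  rw [h1]
  have h3 := PySem.List.slice_natCast_add l (6 * j) 6
  exact_mod_cast h3

lemma fullChunks_props : ∀ (n : Nat) (l : List Char), l.length = n → isBin l →
    ∀ ch ∈ fullChunks l, ch.length = 6 ∧ isBin ch := by
  intro n
  induction n using Nat.strong_induction_on with
  | _ n ih =>
    intro l hl hbin ch hch
    by_cases h6 : 6 ≤ l.length
    · rw [fullChunks_pos h6] at hch
      rcases List.mem_cons.mp hch with rfl | hch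
      · exact ⟨by simp [List.length_take]; omega,
          fun c hc => hbin c (List.mem_of_mem_take hc)⟩
      · exact ih (l.length - 6) (by omega) (l.drop 6) (by simp [List.length_drop])
          (fun c hc => hbin c (List.mem_of_mem_drop hc)) ch hch
    · rw [fullChunks_neg h6] at hch
      simp at hch

lemma flatten_encA (L : List (List Char)) (h : ∀ ch ∈ L, ch.length = 6 ∧ isBin ch) :
    (L.map (fun ch => intToBase64 (binToInt ch))).flatten = L.map encC := by
  induction L with
  | nil => simp
  | cons ch L ihL =>
    have hch := h ch (List.mem_cons_self)
    rw [List.map_cons, List.map_cons, List.flatten_cons,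
      encA_eq ch hch.1 hch.2, ihL (fun ch' h' => h ch' (List.mem_cons_of_mem _ h'))]
    rfl

lemma dom_chars (str : String) (hd : Dom_to_base_64 str) :
    ∀ c ∈ str.toList, c.toNat < 127 := by
  intro c hc
  have h := (List.all_eq_true.mp hd) c hc
  simp only [pvDomChar, Bool.or_eq_true, Bool.and_eq_true, decide_eq_true_eq,
    beq_iff_eq] at h
  omega

lemma isBin_bitsOf (cs : List Char) : isBin (bitsOf cs) := by
  intro c hc
  simp only [bitsOf, List.mem_flatMap] at hc
  obtain ⟨c', -, hc⟩ := hc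
  exact isBin_bitsStr _ c hc

lemma alt_char (str : String) (hd : Dom_to_base_64 str) :
    to_base_64_alt str = String.ofList (trimTrailingA ((chunksPad (bitsOf str.toList)).map encC)) := by
  have hdom := dom_chars str hd
  have hfold := fold_eq str.toList [] [] hdom (by simp)
  have hz : bval ([] : List Char) = 0 := rfl
  rw [hz, List.length_nil, List.nil_append, List.nil_append] at hfold
  simp only [to_base_64_alt]
  rw [hfold]
  by_cases hRe : remBits (bitsOf str.toList) = []
  · rw [if_neg (by simp [hRe])]
    rw [chunksPad, if_pos hRe, List.append_nil]
  · have hlt6 := remBits_length_lt (bitsOf str.toList)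
    have hpos : 0 < (remBits (bitsOf str.toList)).length := List.length_pos_iff.mpr hRe
    rw [if_pos (by simpa using hpos)]
    have hflush : pyB64Table.getD
        ((bval (remBits (bitsOf str.toList)) <<< (6 - (remBits (bitsOf str.toList)).length)) &&& 63) ' '
        = encC (remBits (bitsOf str.toList) ++
            List.replicate (6 - (remBits (bitsOf str.toList)).length) '0') := by
      set R := remBits (bitsOf str.toList) with hR
      have hv : bval (R ++ List.replicate (6 - R.length) '0') = bval R * 2 ^ (6 - R.length) := by
        rw [bval_append, bval_replicate_zero, List.length_replicate]; ring
      have hsmall : bval R * 2 ^ (6 - R.length) < 64 := by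
        calc bval R * 2 ^ (6 - R.length) < 2 ^ R.length * 2 ^ (6 - R.length) :=
              (Nat.mul_lt_mul_right (Nat.two_pow_pos _)).mpr (bval_lt R)
          _ = 2 ^ (R.length + (6 - R.length)) := (pow_add 2 _ _).symm
          _ = 64 := by have h6 : R.length + (6 - R.length) = 6 := by omega
                       rw [h6]; norm_num
      rw [encC, hv, Nat.shiftLeft_eq, and63_eq_mod, Nat.mod_eq_of_lt hsmall]
    rw [hflush, chunksPad, if_neg hRe, List.map_append, List.map_singleton]

lemma a_char (str : String) (hd : Dom_to_base_64 str) :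
    to_base_64 str = String.ofList (trimTrailingA ((chunksPad (bitsOf str.toList)).map encC)) := by
  have hdom := dom_chars str hd
  simp only [to_base_64]
  have hb1 : (str.toList.map (fun c => intToBin c.toNat 8)).flatten = bitsOf str.toList := by
    rw [List.map_congr_left (fun c hc => intToBin_eq c.toNat (hdom c hc)), bitsOf,
      List.flatMap_def]
  rw [hb1]
  set bits := bitsOf str.toList with hbits
  set p := 24 - bits.length % 24 with hp
  set L := bits ++ List.replicate p '0' with hL
  have hLlen : L.length = bits.length + p := by simp [hL]
  have hL6 : L.length % 6 = 0 := by rw [hLlen, hp]; omega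
  obtain ⟨m, hm⟩ : ∃ m, L.length = 6 * m := ⟨L.length / 6, by omega⟩
  rw [slices_eq m L hm,
    flatten_encA _ (fullChunks_props L.length L rfl (by
      intro c hc
      rcases List.mem_append.mp hc with h | h
      · exact isBin_bitsOf _ c h
      · exact Or.inl (List.eq_of_mem_replicate h)))]
  obtain ⟨q, hq⟩ := pad_split bits.length bits p rfl (by omega)
  rw [hL, hq, List.map_append, List.map_replicate, encC_zero, trim_append_replicate]


-- ===== VERDICT (by name: the statement is the Claim_ definition above) =====
theorem to_base_64_spec : Claim_equal_to_base_64 := by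
  intro str hd _
  unfold Spec_to_base_64
  rw [a_char str hd, alt_char str hd]
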